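-- pv_equiv track=rewrite | github.com/guillainbisimwa/competitive-programming | A_Maximum_Multiple_Sum.py | find_optimal_x
-- ===== SOURCE A (Python) =====
-- def find_optimal_x(n):
--     max_sum = 0
--     best_x = 2
--
--     for x in range(2, n+1):
--         current_sum = sum(multiple for multiple in range(x, n+1, x))
--         if current_sum > max_sum:
--             max_sum = current_sum
--             best_x = x
--
--     return best_x
-- ===== SOURCE B (Python) =====
-- def find_optimal_x(n):
--     # Closed form: for n >= 4 the multiples of 2 sum to n//2*(n//2+1), which
--     # strictly exceeds x*(n//x)*(n//x+1)//2 for every x >= 3, so the answer is 2;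
--     # the only exception is n == 3 (sum 3 for x=3 beats sum 2 for x=2).
--     return 3 if n == 3 else 2
-- ===== Notes on version B (the rewrite author's own statement) =====
-- stated objective: faster
-- what changed: The double loop is replaced by the O(1) closed form 'return 3 if n == 3 else 2', justified by proving that the sum of multiples of 2 strictly dominates every other x once n >= 4.
import Mathlib
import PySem

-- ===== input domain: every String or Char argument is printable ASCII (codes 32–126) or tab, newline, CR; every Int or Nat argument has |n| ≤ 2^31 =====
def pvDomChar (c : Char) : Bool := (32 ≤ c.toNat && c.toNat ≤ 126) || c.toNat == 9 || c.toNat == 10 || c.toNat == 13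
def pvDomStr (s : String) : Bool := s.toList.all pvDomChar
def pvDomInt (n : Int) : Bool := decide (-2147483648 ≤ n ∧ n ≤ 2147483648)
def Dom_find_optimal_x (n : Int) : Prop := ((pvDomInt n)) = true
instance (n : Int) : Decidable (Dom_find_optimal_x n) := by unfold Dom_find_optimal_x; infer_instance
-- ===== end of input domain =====

-- B replaces A's double loop by the O(1) closed form 'return 3 if n == 3 else 2',
-- proved exact: for n >= 4 the sum of multiples of 2 strictly dominates every other x (objective: faster).

-- ===== PORT A =====
def find_optimal_x (n : Int) : Int :=
  let r := (PySem.List.pyRange 2 (n + 1) 1).foldl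
    (fun st x =>
      let current_sum := (PySem.List.pyRange x (n + 1) x).foldl (· + ·) 0
      if current_sum > st.1 then (current_sum, x) else st)
    (0, 2)
  r.2

-- ===== PORT B =====
def find_optimal_x_alt (n : Int) : Int :=
  if n = 3 then 3 else 2

-- ===== PRECONDITION & SPEC =====
def Spec_find_optimal_x (n : Int) (out : Int) : Prop := out = find_optimal_x_alt n
instance (n : Int) (out : Int) : Decidable (Spec_find_optimal_x n out) := by unfold Spec_find_optimal_x; infer_instance

-- ===== CLAIM (what is proved, stated in full; the proofs are below) =====
def Claim_equal_find_optimal_x : Prop := ∀ (n : Int), Dom_find_optimal_x n → Spec_find_optimal_x n (find_optimal_x n)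

-- ===== LEMMAS AND PROOFS =====

-- Gauss: twice the sum of x + x*j for j < m is x*m*(m+1).
lemma pv_two_mul_gauss (x : Int) (m : Nat) :
    2 * ((List.range m).map (fun j : Nat => x + x * (j : Int))).sum = x * m * (m + 1) := by
  induction m with
  | zero => simp
  | succ m ih =>
    rw [List.range_succ, List.map_append, List.sum_append]
    simp only [List.map_cons, List.map_nil, List.sum_cons, List.sum_nil]
    push_cast
    push_cast at ih
    linear_combination ih

-- A's inner loop: twice the sum of multiples of x in [x, n] is x*(n/x)*(n/x + 1).
lemma pv_inner (n x : Int) (hx : 2 ≤ x) (hxn : x ≤ n) :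
    2 * ((PySem.List.pyRange x (n + 1) x).foldl (· + ·) 0) = x * (n / x) * (n / x + 1) := by
  have hx0 : (0 : Int) < x := by omega
  rw [PySem.List.pyRange_of_pos x (n + 1) hx0, if_pos (by omega : x < n + 1)]
  have hm : (n + 1 - x + x - 1) / x = n / x := by congr 1; omega
  rw [hm, ← List.sum_eq_foldl]
  have hk1 : 1 ≤ n / x := (Int.le_ediv_iff_mul_le hx0).2 (by omega)
  have hg := pv_two_mul_gauss x (n / x).toNat
  rwa [Int.toNat_of_nonneg (by omega)] at hg

-- foldl with a state every element fixes is constant.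
lemma pv_foldl_fixed {α β : Type} (f : α → β → α) (s : α) (l : List β)
    (h : ∀ x ∈ l, f s x = s) : l.foldl f s = s := by
  induction l with
  | nil => rfl
  | cons a t ih =>
    rw [List.foldl_cons, h a List.mem_cons_self]
    exact ih (fun x hx => h x (List.mem_cons_of_mem a hx))

-- Dominance: for n ≥ 7 and 3 ≤ x ≤ n, the sum of multiples of x does not exceed that of 2.
lemma pv_dominance (n x : Int) (hn : 7 ≤ n) (hx : 3 ≤ x) (hxn : x ≤ n) :
    x * (n / x) * (n / x + 1) ≤ 2 * (n / 2) * (n / 2 + 1) := by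
  have hx0 : (0 : Int) < x := by omega
  obtain ⟨m, hm⟩ : ∃ m, m = n / x := ⟨n / x, rfl⟩
  obtain ⟨k, hk⟩ : ∃ k, k = n / 2 := ⟨n / 2, rfl⟩
  rw [← hm, ← hk]
  have hmx : x * m ≤ n := by
    have h := Int.ediv_mul_le n (show x ≠ 0 by omega)
    rw [← hm] at h; linarith [mul_comm x m ▸ h]
  have hm1 : 1 ≤ m := hm ▸ (Int.le_ediv_iff_mul_le hx0).2 (by omega)
  have hmt : 3 * m ≤ n := le_trans (by nlinarith) hmx
  have hk2 : 2 * k ≤ n := by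
    have h := Int.ediv_mul_le n (show (2:Int) ≠ 0 by omega)
    rw [← hk] at h; linarith
  have hk2' : n ≤ 2 * k + 1 := by
    have h := Int.lt_ediv_add_one_mul_self n (show (0:Int) < 2 by omega)
    rw [← hk] at h; linarith
  have h1 : x * m * (m + 1) ≤ n * (m + 1) := by nlinarith
  have h2 : n * (m + 1) ≤ 2 * k * (k + 1) := by nlinarith
  linarith

-- ===== VERDICT (by name: the statement is the Claim_ definition above) =====
theorem find_optimal_x_spec : Claim_equal_find_optimal_x := by
  intro n _
  show find_optimal_x n = find_optimal_x_alt n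
  rcases (by omega : n ≤ 1 ∨ 1 < n) with h1 | h1
  · unfold find_optimal_x find_optimal_x_alt
    rw [PySem.List.pyRange_one_eq_nil (by omega)]
    simp; omega
  rcases (by omega : n ≤ 6 ∨ 6 < n) with h6 | h6
  · interval_cases n <;> decide
  -- main case: n ≥ 7
  unfold find_optimal_x find_optimal_x_alt
  rw [if_neg (by omega : ¬ n = 3)]
  rw [PySem.List.pyRange_one_cons (by omega : (2:Int) < n + 1), List.foldl_cons]
  set S2 := (PySem.List.pyRange 2 (n + 1) 2).foldl (· + ·) 0 with hS2
  have hS2v : 2 * S2 = 2 * (n / 2) * (n / 2 + 1) := pv_inner n 2 (by omega) (by omega)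
  have hk3 : 3 ≤ n / 2 := (Int.le_ediv_iff_mul_le (by omega)).2 (by omega)
  have hpos : (0 : Int) < S2 := by nlinarith
  have hstep : (if S2 > (0:Int) then (S2, (2:Int)) else ((0:Int), (2:Int))) = (S2, 2) := by
    rw [if_pos hpos]
  dsimp only
  rw [hstep, pv_foldl_fixed]
  intro x hxmem
  have hxr := (PySem.List.mem_pyRange_one (a := 3) (b := n + 1) (x := x)).1 hxmem
  dsimp only
  rw [if_neg]
  have hsx := pv_inner n x (by omega) (by omega)
  have hd := pv_dominance n x (by omega) hxr.1 (by omega)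
  simp only [gt_iff_lt, not_lt]
  omega
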